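-- pv_equiv track=rewrite | github.com/meluwke/MIT-s-6.100L | common string ben.py | commonstring
-- ===== SOURCE A (Python) =====
-- def commonstring(string1,string2):
--     common=[]
--     onlystring1=[]
--     onlystring2=[]
--     for char in string1:
--         if char in string2:
--             if char not in common:
--                 common.append(char)
--         else:
--             onlystring1.append(char)
--     for char in string2:
--         if char not in string1 and char not in common:
--             onlystring2.append(char)
--     return (common, onlystring1,onlystring2)
-- ===== SOURCE B (Python) =====
-- def commonstring(string1, string2):
--     s1, s2 = set(string1), set(string2)
--     common = sorted(s1 & s2, key=string1.index)
--     onlystring1 = [c for c in string1 if c not in s2]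
--     onlystring2 = [c for c in string2 if c not in s1]
--     return (common, onlystring1, onlystring2)
-- ===== Notes on version B (the rewrite author's own statement) =====
-- stated objective: alternative
-- what changed: B computes the shared characters as a set intersection sorted by first index in string1 (instead of A's scan-and-dedup append loop) and derives each 'only' bucket as a single comprehension against the other string's set, dropping A's redundant 'not in common' conjunct.
import Mathlib
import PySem

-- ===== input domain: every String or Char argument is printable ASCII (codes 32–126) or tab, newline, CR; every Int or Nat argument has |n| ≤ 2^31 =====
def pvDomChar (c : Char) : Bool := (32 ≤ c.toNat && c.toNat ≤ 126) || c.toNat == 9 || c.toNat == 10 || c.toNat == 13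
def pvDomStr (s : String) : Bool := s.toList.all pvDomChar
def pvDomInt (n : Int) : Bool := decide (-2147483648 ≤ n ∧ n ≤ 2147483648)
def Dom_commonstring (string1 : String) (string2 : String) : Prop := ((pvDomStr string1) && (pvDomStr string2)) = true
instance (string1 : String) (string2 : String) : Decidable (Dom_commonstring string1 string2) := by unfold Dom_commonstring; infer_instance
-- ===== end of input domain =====

-- B computes the shared characters as a set intersection sorted by first index in string1,
-- and each "only" bucket as one filter against the other string's character set (objective:
-- alternative algorithm, same result).

-- ===== PORT A =====
-- 'char in stringN' for the 1-char loop variable is exactly list membership of the Char,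
-- so it is ported as .toList.contains (exact on all inputs).
def commonstring (string1 : String) (string2 : String) : List String × List String × List String :=
  -- first loop: builds common (no duplicates) and onlystring1 in one pass over string1
  let r := string1.toList.foldl
    (fun (acc : List Char × List Char) char =>
      if string2.toList.contains char then
        (if acc.1.contains char then acc.1 else acc.1 ++ [char], acc.2)
      else
        (acc.1, acc.2 ++ [char]))
    ([], [])
  -- second loop: onlystring2
  let only2 := string2.toList.foldl
    (fun (acc : List Char) char =>
      if !string1.toList.contains char && !r.1.contains char then acc ++ [char] else acc)
    []
  (r.1.map String.singleton, r.2.map String.singleton, only2.map String.singleton)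

-- ===== PORT B =====
-- string1.index(c) on a 1-char c is list index of the Char; it is called only on c ∈ s1 & s2,
-- where index? is some, so the total form .getD 0 is exact here.
def commonstring_alt (string1 : String) (string2 : String) : List String × List String × List String :=
  let s1 : PySem.Set Char := PySem.Set.ofList string1.toList
  let s2 : PySem.Set Char := PySem.Set.ofList string2.toList
  let common : List Char := PySem.List.sorted (PySem.Set.inter s1 s2)
    (fun c => (PySem.List.index? string1.toList c).getD 0)
  (common.map String.singleton,
   (string1.toList.filter (fun c => !PySem.Set.contains s2 c)).map String.singleton,
   (string2.toList.filter (fun c => !PySem.Set.contains s1 c)).map String.singleton)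

-- ===== PRECONDITION & SPEC =====
def Spec_commonstring (string1 : String) (string2 : String) (out : List String × List String × List String) : Prop := out = commonstring_alt string1 string2
instance (string1 : String) (string2 : String) (out : List String × List String × List String) : Decidable (Spec_commonstring string1 string2 out) := by unfold Spec_commonstring; infer_instance

-- ===== CLAIM (what is proved, stated in full; the proofs are below) =====
def Claim_equal_commonstring : Prop := ∀ (string1 : String) (string2 : String), Dom_commonstring string1 string2 → Spec_commonstring string1 string2 (commonstring string1 string2)

-- ===== LEMMAS AND PROOFS =====

-- A's first loop: common is the dedup of the hits, only1 the misses, in order.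
theorem pvFold1 (l2 : List Char) : ∀ (l : List Char) (a b : List Char),
    (l.foldl
      (fun (acc : List Char × List Char) char =>
        if l2.contains char then
          (if acc.1.contains char then acc.1 else acc.1 ++ [char], acc.2)
        else
          (acc.1, acc.2 ++ [char]))
      (a, b))
    = ((l.filter (fun c => l2.contains c)).foldl PySem.Set.add a,
       b ++ l.filter (fun c => !l2.contains c)) := by
  intro l
  induction l with
  | nil => simp
  | cons c t ih =>
      intro a b
      simp only [List.foldl_cons, List.filter_cons]
      by_cases h : l2.contains c = true
      · rw [if_pos h, ih]
        have hm : c ∈ l2 := by simpa using h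
        simp [hm, PySem.Set.add]
      · rw [if_neg h, ih]
        have hm : c ∉ l2 := by simpa using h
        simp [hm]

theorem pvCommonA (l1 l2 : List Char) :
    (l1.filter (fun c => l2.contains c)).foldl PySem.Set.add []
    = PySem.List.dedup (l1.filter (fun c => l2.contains c)) := by
  rw [PySem.List.dedup_eq_ofList, PySem.Set.ofList_eq_foldl]

-- dedup commutes with filter (p depends on the element only)
theorem pvDedupFilter (p : Char → Bool) : ∀ (xs : List Char),
    PySem.List.dedup (xs.filter p) = (PySem.List.dedup xs).filter p := by
  intro xs
  induction xs with
  | nil => simp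
  | cons x t ih =>
      simp only [PySem.List.dedup_eq_ofList] at ih ⊢
      by_cases hp : p x = true
      · rw [List.filter_cons_of_pos hp, PySem.Set.ofList_cons, PySem.Set.ofList_cons,
          List.filter_cons_of_pos hp, ih]
        simp only [PySem.Set.discard, List.filter_comm]
      · rw [List.filter_cons_of_neg (by simp [hp]), PySem.Set.ofList_cons,
          List.filter_cons_of_neg (by simp [hp]), ih]
        simp only [PySem.Set.discard, List.filter_filter]
        apply List.filter_congr
        intro c _
        by_cases hcx : c = x
        · subst hcx; simp [hp]
        · simp [hcx]

-- a char of a list has a first index there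
theorem pvIdxSome (t : List Char) (c : Char) (hc : c ∈ t) : ∃ k, List.idxOf? c t = some k := by
  cases h : List.idxOf? c t with
  | none => exact absurd (List.idxOf?_eq_none_iff.1 h) (by simp [hc])
  | some k => exact ⟨k, rfl⟩

-- first-occurrence indices strictly increase along dedup
theorem pvDedupPairwise : ∀ (xs : List Char),
    (PySem.List.dedup xs).Pairwise
      (fun a b => (List.idxOf? a xs).getD 0 < (List.idxOf? b xs).getD 0) := by
  intro xs
  induction xs with
  | nil => simp [PySem.List.dedup_eq_ofList, PySem.Set.ofList_nil]
  | cons x t ih =>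
      rw [PySem.List.dedup_eq_ofList, PySem.Set.ofList_cons]
      constructor
      · intro b hb
        simp only [PySem.Set.discard, List.mem_filter, PySem.Set.mem_ofList,
          Bool.not_eq_eq_eq_not, Bool.not_true, beq_eq_false_iff_ne, ne_eq] at hb
        obtain ⟨hbt, hbx⟩ := hb
        obtain ⟨k, hk⟩ := pvIdxSome t b hbt
        rw [List.idxOf?_cons, List.idxOf?_cons]
        simp [hk, Ne.symm hbx]
      · have hsub : List.Sublist ((PySem.Set.ofList t).discard x) (PySem.Set.ofList t) :=
          List.filter_sublist
        have hpw := ih.sublist (by simpa [PySem.List.dedup_eq_ofList] using hsub)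
        apply hpw.imp_of_mem
        intro a b ha hb hab
        simp only [PySem.Set.discard, List.mem_filter, PySem.Set.mem_ofList,
          Bool.not_eq_eq_eq_not, Bool.not_true, beq_eq_false_iff_ne, ne_eq] at ha hb
        obtain ⟨ka, hka⟩ := pvIdxSome t a ha.1
        obtain ⟨kb, hkb⟩ := pvIdxSome t b hb.1
        rw [hka, hkb] at hab
        rw [List.idxOf?_cons, List.idxOf?_cons]
        simp [hka, hkb, Ne.symm ha.2, Ne.symm hb.2]
        simpa using hab

-- B's sorted intersection IS A's deduped filtered scan
theorem pvCommonEq (l1 l2 : List Char) :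
    PySem.List.sorted (PySem.Set.inter (PySem.Set.ofList l1) (PySem.Set.ofList l2))
      (fun c => (PySem.List.index? l1 c).getD 0)
    = PySem.List.dedup (l1.filter (fun c => l2.contains c)) := by
  apply PySem.List.sorted_eq_of_perm_of_pairwise_lt
  · rw [List.perm_ext_iff_of_nodup (PySem.List.nodup_dedup _)
      (PySem.Set.nodup_inter _ _ (PySem.Set.nodup_ofList _))]
    intro a
    simp [List.mem_filter, PySem.Set.mem_inter, PySem.Set.mem_ofList]
  · simp only [PySem.List.index?_eq_idxOf?]
    rw [pvDedupFilter]
    exact (pvDedupPairwise l1).sublist List.filter_sublist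

theorem pvOnly1Eq (l1 l2 : List Char) :
    l1.filter (fun c => !l2.contains c)
    = l1.filter (fun c => !(PySem.Set.ofList l2).contains c) := by
  simp

theorem pvOnly2Eq (l1 l2 : List Char) :
    l2.filter (fun c => !l1.contains c && !(PySem.List.dedup (l1.filter (fun c => l2.contains c))).contains c)
    = l2.filter (fun c => !(PySem.Set.ofList l1).contains c) := by
  apply List.filter_congr
  intro c _
  by_cases h : c ∈ l1
  · simp [h, List.contains_eq_mem]
  · have : c ∉ PySem.List.dedup (l1.filter (fun c => l2.contains c)) := by
      simp [List.mem_filter]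
      intro hc; exact absurd hc h
    simp [h, List.contains_eq_mem]

theorem commonstring_eq_alt (string1 string2 : String) :
    commonstring string1 string2 = commonstring_alt string1 string2 := by
  simp only [commonstring, commonstring_alt]
  rw [pvFold1]
  simp only [pvCommonA, PySem.List.foldl_append_if_eq_filter, List.nil_append]
  rw [pvOnly1Eq string1.toList string2.toList, pvOnly2Eq string1.toList string2.toList,
    pvCommonEq string1.toList string2.toList]

-- ===== VERDICT (by name: the statement is the Claim_ definition above) =====
theorem commonstring_spec : Claim_equal_commonstring := by
  intro s1 s2 _
  unfold Spec_commonstring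
  exact commonstring_eq_alt s1 s2
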